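-- pv_equiv track=rewrite | github.com/nghiatt90/cs-practice | codelearn/sumofthrees.py | sumOfThrees
-- ===== SOURCE A (Python) =====
-- def sumOfThrees(n):
--     p = [3**i for i in range(40)]
--     n = int(n)
--     r = []
--     for i in range(39, -1, -1):
--         if n >= p[i]:
--             n -= p[i]
--             r.append(i)
--     if n == 0:
--         return '+'.join('3^%d' % i for i in r)
--     return 'Impossible'
-- ===== SOURCE B (Python) =====
-- def sumOfThrees(n):
--     n = int(n)
--     if n < 0:
--         return 'Impossible'
--     ones = []
--     i = 0
--     while n > 0:
--         n, d = divmod(n, 3)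
--         if d == 2:
--             return 'Impossible'
--         if d == 1:
--             ones.append(i)
--         i += 1
--     return '+'.join('3^%d' % j for j in reversed(ones))
-- ===== Notes on version B (the rewrite author's own statement) =====
-- stated objective: idiomatic
-- what changed: Replaced A's precomputed power table and greedy descending subtraction loop with direct base-three digit extraction via divmod, collecting the positions of one-digits and bailing out on any two-digit.
import Mathlib
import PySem

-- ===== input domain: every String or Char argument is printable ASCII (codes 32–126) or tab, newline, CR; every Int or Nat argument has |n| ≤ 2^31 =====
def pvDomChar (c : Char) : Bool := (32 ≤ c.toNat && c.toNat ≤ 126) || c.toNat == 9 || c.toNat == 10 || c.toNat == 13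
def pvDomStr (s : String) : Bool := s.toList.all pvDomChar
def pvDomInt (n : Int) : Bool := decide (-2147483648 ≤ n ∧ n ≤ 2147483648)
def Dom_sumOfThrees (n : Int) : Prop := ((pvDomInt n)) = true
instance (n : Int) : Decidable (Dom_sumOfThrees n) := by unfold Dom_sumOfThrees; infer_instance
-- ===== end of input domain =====

-- B writes n as a sum of distinct powers of 3 by base-3 digit extraction (divmod) instead of
-- A's precomputed power table with greedy descending subtraction; return values agree on all of Dom.

-- ===== PORT A =====
-- 'int(n)' is the identity on Int; p[i] is always indexed with 0 ≤ i ≤ 39 < len(p), so '.getD 0' is exact.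
def sumOfThrees (n : Int) : String :=
  let p : List Int := (List.range 40).map (fun i => (3:Int)^i)
  let res := (PySem.List.pyRange 39 (-1) (-1)).foldl
      (fun (s : Int × List Int) (i : Int) =>
        if s.1 ≥ (PySem.List.pyGet? p i).getD 0 then
          (s.1 - (PySem.List.pyGet? p i).getD 0, s.2 ++ [i])
        else s)
      (n, [])
  if res.1 = 0 then
    PySem.Str.join "+" (res.2.map (fun i => "3^" ++ PySem.Int.toStr i))
  else "Impossible"

-- ===== PORT B =====
-- the 'while n > 0' loop of Source B; 'none' = the early 'return Impossible' on a base-3 digit 2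
def bLoop (n : Nat) (i : Int) (ones : List Int) : Option (List Int) :=
  if _h : n = 0 then some ones
  else if n % 3 = 2 then none
  else bLoop (n / 3) (i + 1) (if n % 3 = 1 then ones ++ [i] else ones)
termination_by n
decreasing_by exact Nat.div_lt_self (by omega) (by omega)

def sumOfThrees_alt (n : Int) : String :=
  if n < 0 then "Impossible"
  else
    match bLoop n.toNat 0 [] with
    | none => "Impossible"
    | some ones => PySem.Str.join "+" (ones.reverse.map (fun i => "3^" ++ PySem.Int.toStr i))

-- ===== PRECONDITION & SPEC =====
def Spec_sumOfThrees (n : Int) (out : String) : Prop := out = sumOfThrees_alt n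
instance (n : Int) (out : String) : Decidable (Spec_sumOfThrees n out) := by unfold Spec_sumOfThrees; infer_instance

-- ===== CLAIM (what is proved, stated in full; the proofs are below) =====
def Claim_equal_sumOfThrees : Prop := ∀ (n : Int), Dom_sumOfThrees n → Spec_sumOfThrees n (sumOfThrees n)

-- ===== LEMMAS AND PROOFS =====

-- A's greedy loop, indices i down to 0, as structural recursion on i
def gA : Nat → Int × List Int → Int × List Int
  | 0, s => if s.1 ≥ 1 then (s.1 - 1, s.2 ++ [(0:Int)]) else s
  | i+1, s => gA i (if s.1 ≥ (3:Int)^(i+1) then (s.1 - (3:Int)^(i+1), s.2 ++ [((i:Int)+1)]) else s)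

-- sum of 3^0 + … + 3^i
def sumPow : Nat → Int
  | 0 => 1
  | i+1 => (3:Int)^(i+1) + sumPow i

-- all base-3 digits of n are ≤ 1
def good (n : Nat) : Bool :=
  if _h : n = 0 then true
  else if n % 3 = 2 then false else good (n / 3)
termination_by n
decreasing_by exact Nat.div_lt_self (by omega) (by omega)

-- ascending positions (offset j) of the base-3 digits of n equal to 1
def pos3 (n : Nat) (j : Int) : List Int :=
  if _h : n = 0 then []
  else (if n % 3 = 1 then [j] else []) ++ pos3 (n / 3) (j + 1)
termination_by n
decreasing_by exact Nat.div_lt_self (by omega) (by omega)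

theorem good_eq (n : Nat) : good n = if n = 0 then true else if n % 3 = 2 then false else good (n / 3) := by
  rw [good]; split <;> rfl

theorem pos3_eq (n : Nat) (j : Int) :
    pos3 n j = if n = 0 then [] else (if n % 3 = 1 then [j] else []) ++ pos3 (n / 3) (j + 1) := by
  rw [pos3]; split <;> rfl

theorem bLoop_unfold (n : Nat) (i : Int) (ones : List Int) :
    bLoop n i ones = if n = 0 then some ones
      else if n % 3 = 2 then none
      else bLoop (n / 3) (i + 1) (if n % 3 = 1 then ones ++ [i] else ones) := by
  rw [bLoop]; split <;> rfl

theorem gA_neg (i : Nat) : ∀ (x : Int) (r : List Int), x < 1 → gA i (x, r) = (x, r) := by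
  induction i with
  | zero => intro x r hx; simp only [gA]; rw [if_neg (by omega)]
  | succ i ih =>
      intro x r hx
      have h3 : (1:Int) ≤ 3^(i+1) := one_le_pow₀ (by norm_num)
      simp only [gA]
      rw [if_neg (by omega)]
      exact ih x r hx

theorem sumPow_pos (i : Nat) : 0 < sumPow i := by
  induction i with
  | zero => simp [sumPow]
  | succ i ih =>
      have h : (0:Int) < 3^(i+1) := by positivity
      simp only [sumPow]; omega

theorem sumPow_lt (i : Nat) : sumPow i < 3^(i+1) := by
  induction i with
  | zero => simp [sumPow]
  | succ i ih =>
      have h : (3:Int)^(i+1+1) = 3^(i+1) + 3^(i+1) + 3^(i+1) := by ring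
      have hp : (0:Int) < 3^(i+1) := by positivity
      simp only [sumPow]
      omega

theorem gA_big (i : Nat) : ∀ (x : Int) (r : List Int), sumPow i < x → (gA i (x, r)).1 = x - sumPow i := by
  induction i with
  | zero =>
      intro x r hx
      simp only [sumPow] at hx ⊢
      simp only [gA]
      rw [if_pos (by omega)]
  | succ i ih =>
      intro x r hx
      have hp := sumPow_pos i
      have hq : (0:Int) < 3^(i+1) := by positivity
      simp only [sumPow] at hx
      simp only [gA]
      rw [if_pos (by omega)]
      rw [ih _ _ (by omega)]
      simp only [sumPow]; ring

theorem good_pow_add (i : Nat) : ∀ m, m < 3^i → good (3^i + m) = good m := by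
  induction i with
  | zero => intro m hm; interval_cases m; simp [good_eq]
  | succ i ih =>
      intro m hm
      have hq : (0:Nat) < 3^i := Nat.pow_pos (by norm_num)
      have h3 : (3:Nat)^(i+1) = 3 * 3^i := by ring
      have e1 : (3^(i+1) + m) % 3 = m % 3 := by omega
      have e2 : (3^(i+1) + m) / 3 = 3^i + m / 3 := by omega
      have h2 : m / 3 < 3^i := by omega
      rw [good_eq, if_neg (by omega), e1, e2, ih _ h2]
      by_cases hm0 : m = 0
      · subst hm0; simp [good_eq]
      · conv_rhs => rw [good_eq, if_neg hm0]

theorem good_two_pow_add (i : Nat) : ∀ m, m < 3^i → good (2 * 3^i + m) = false := by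
  induction i with
  | zero => intro m hm; interval_cases m; simp [good_eq]
  | succ i ih =>
      intro m hm
      have hq : (0:Nat) < 3^i := Nat.pow_pos (by norm_num)
      have h3 : (3:Nat)^(i+1) = 3 * 3^i := by ring
      have e1 : (2 * 3^(i+1) + m) % 3 = m % 3 := by omega
      have e2 : (2 * 3^(i+1) + m) / 3 = 2 * 3^i + m / 3 := by omega
      have h2 : m / 3 < 3^i := by omega
      rw [good_eq, if_neg (by omega), e1, e2, ih _ h2]
      split <;> rfl

theorem pos3_pow_add (i : Nat) : ∀ (m : Nat) (j : Int), m < 3^i → pos3 (3^i + m) j = pos3 m j ++ [j + (i:Int)] := by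
  induction i with
  | zero =>
      intro m j hm; interval_cases m
      simp [pos3_eq]
  | succ i ih =>
      intro m j hm
      have hq : (0:Nat) < 3^i := Nat.pow_pos (by norm_num)
      have h3 : (3:Nat)^(i+1) = 3 * 3^i := by ring
      have e1 : (3^(i+1) + m) % 3 = m % 3 := by omega
      have e2 : (3^(i+1) + m) / 3 = 3^i + m / 3 := by omega
      have h2 : m / 3 < 3^i := by omega
      rw [pos3_eq, if_neg (by omega), e1, e2, ih _ _ h2]
      by_cases hm0 : m = 0
      · subst hm0
        simp [pos3_eq]
        ring
      · conv_rhs => rw [pos3_eq, if_neg hm0]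
        simp only [List.append_assoc]
        congr 2
        push_cast; ring_nf

theorem bLoop_eq (n : Nat) : ∀ (i : Int) (ones : List Int),
    bLoop n i ones = if good n then some (ones ++ pos3 n i) else none := by
  induction n using Nat.strong_induction_on with
  | _ n ih =>
    intro i ones
    by_cases h0 : n = 0
    · subst h0; simp [bLoop_unfold, good_eq, pos3_eq]
    · rw [bLoop_unfold, if_neg h0]
      by_cases h2 : n % 3 = 2
      · rw [if_pos h2]
        rw [good_eq, if_neg h0, if_pos h2]
        simp
      · rw [if_neg h2, ih (n / 3) (Nat.div_lt_self (by omega) (by omega))]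
        conv_rhs => rw [good_eq, if_neg h0, if_neg h2, pos3_eq, if_neg h0]
        by_cases hg : good (n / 3)
        · rw [if_pos hg, if_pos hg]
          by_cases h1 : n % 3 = 1
          · rw [if_pos h1, if_pos h1]; simp
          · rw [if_neg h1, if_neg h1]; simp
        · simp [hg]

theorem L_succ (i : Nat) : ∀ (n : Nat) (r : List Int), n < 3^(i+1) → good n = true →
    gA i ((n:Int), r) = (0, r ++ (pos3 n 0).reverse) := by
  induction i with
  | zero =>
      intro n r hn hg
      interval_cases n
      · simp [gA, pos3_eq]
      · simp only [gA]; rw [if_pos (by norm_num)]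
        simp [pos3_eq]
      · simp [good_eq] at hg
  | succ i ih =>
      intro n r hn hg
      have hq : (0:Nat) < 3^(i+1) := Nat.pow_pos (by norm_num)
      have hcast : ((3^(i+1) : Nat) : Int) = (3:Int)^(i+1) := by push_cast; ring
      by_cases hlt : n < 3^(i+1)
      · -- digit is 0: no pick
        simp only [gA]
        rw [if_neg (by omega)]
        exact ih n r hlt hg
      · by_cases hlt2 : n < 2 * 3^(i+1)
        · -- digit is 1: pick
          have hdecomp : n = 3^(i+1) + (n - 3^(i+1)) := by omega
          have hm : n - 3^(i+1) < 3^(i+1) := by omega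
          have hg' : good (n - 3^(i+1)) = true := by
            rw [hdecomp, good_pow_add (i+1) _ hm] at hg; exact hg
          simp only [gA]
          rw [if_pos (by omega)]
          have hsub : ((n:Int) - 3^(i+1)) = ((n - 3^(i+1) : Nat) : Int) := by omega
          rw [hsub, ih _ _ hm hg']
          conv_rhs => rw [hdecomp, pos3_pow_add (i+1) _ 0 hm]
          simp only [List.reverse_append, List.reverse_cons, List.reverse_nil]
          simp [List.append_assoc]
        · -- digit is 2: good n is false, contradiction
          have hdecomp : n = 2 * 3^(i+1) + (n - 2 * 3^(i+1)) := by omega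
          have hm : n - 2 * 3^(i+1) < 3^(i+1) := by
            have : (3:Nat)^(i+1+1) = 3 * 3^(i+1) := by ring
            omega
          rw [hdecomp, good_two_pow_add (i+1) _ hm] at hg
          exact absurd hg (by simp)

theorem L_fail (i : Nat) : ∀ (n : Nat) (r : List Int), n < 3^(i+1) → good n = false →
    (gA i ((n:Int), r)).1 ≠ 0 := by
  induction i with
  | zero =>
      intro n r hn hg
      interval_cases n
      · simp [good_eq] at hg
      · simp [good_eq] at hg
      · simp only [gA]; rw [if_pos (by norm_num)]; norm_num
  | succ i ih =>
      intro n r hn hg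
      have hq : (0:Nat) < 3^(i+1) := Nat.pow_pos (by norm_num)
      have hcast : ((3^(i+1) : Nat) : Int) = (3:Int)^(i+1) := by push_cast; ring
      by_cases hlt : n < 3^(i+1)
      · simp only [gA]
        rw [if_neg (by omega)]
        exact ih n r hlt hg
      · by_cases hlt2 : n < 2 * 3^(i+1)
        · have hdecomp : n = 3^(i+1) + (n - 3^(i+1)) := by omega
          have hm : n - 3^(i+1) < 3^(i+1) := by omega
          have hg' : good (n - 3^(i+1)) = false := by
            rw [hdecomp, good_pow_add (i+1) _ hm] at hg; exact hg
          simp only [gA]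
          rw [if_pos (by omega)]
          have hsub : ((n:Int) - 3^(i+1)) = ((n - 3^(i+1) : Nat) : Int) := by omega
          rw [hsub]
          exact ih _ _ hm hg'
        · -- digit 2: remainder stays positive, by gA_big
          simp only [gA]
          rw [if_pos (by omega)]
          have hbig : sumPow i < (n:Int) - 3^(i+1) := by
            have h1 := sumPow_lt i
            omega
          rw [gA_big i _ _ hbig]
          have := sumPow_lt i
          omega

theorem pGet (i : Nat) (h : i < 40) :
    (PySem.List.pyGet? ((List.range 40).map (fun k => (3:Int)^k)) ((i:Nat):Int)).getD 0 = (3:Int)^i := by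
  rw [PySem.List.pyGet?_natCast]
  simp [h]

-- A's foldl over range(39, -1, -1) is gA
theorem bridge (i : Nat) (hi : i ≤ 39) : ∀ s : Int × List Int,
    (PySem.List.pyRange (i:Int) (-1) (-1)).foldl
      (fun (s : Int × List Int) (j : Int) =>
        if s.1 ≥ (PySem.List.pyGet? ((List.range 40).map (fun k => (3:Int)^k)) j).getD 0 then
          (s.1 - (PySem.List.pyGet? ((List.range 40).map (fun k => (3:Int)^k)) j).getD 0, s.2 ++ [j])
        else s) s
    = gA i s := by
  induction i with
  | zero =>
      intro s
      rw [PySem.List.pyRange_neg_one_cons (by norm_num)]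
      rw [show ((0:Nat):Int) - 1 = (-1:Int) by norm_num]
      rw [PySem.List.pyRange_neg_one_eq_nil (by norm_num)]
      simp only [List.foldl_cons, List.foldl_nil]
      rw [pGet 0 (by norm_num)]
      simp [gA]
  | succ i ih =>
      intro s
      rw [PySem.List.pyRange_neg_one_cons (by push_cast; omega)]
      rw [show ((i+1:Nat):Int) - 1 = ((i:Nat):Int) by push_cast; ring]
      simp only [List.foldl_cons]
      rw [ih (by omega)]
      rw [pGet (i+1) (by omega)]
      simp only [gA]
      push_cast
      rfl

theorem sumOfThrees_spec : Claim_equal_sumOfThrees := by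
  intro n hdom
  show sumOfThrees n = sumOfThrees_alt n
  simp only [Dom_sumOfThrees, pvDomInt, decide_eq_true_eq] at hdom
  rw [sumOfThrees, sumOfThrees_alt]
  rw [show (39:Int) = ((39:Nat):Int) by norm_num, bridge 39 (by norm_num)]
  by_cases hneg : n < 0
  · rw [gA_neg 39 n [] (by omega), if_pos hneg, if_neg (by omega)]
  · rw [if_neg hneg]
    obtain ⟨m, rfl⟩ : ∃ m : Nat, n = ((m:Nat):Int) := ⟨n.toNat, by omega⟩
    rw [Int.toNat_natCast]
    have hlt : m < 3^(39+1) := by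
      have h40 : (2147483649 : Nat) ≤ 3^(39+1) := by norm_num
      omega
    rw [bLoop_eq]
    cases hg : good m with
    | false =>
        rw [if_neg (L_fail 39 m [] hlt hg), if_neg (show ¬(false = true) by simp)]
    | true =>
        rw [L_succ 39 m [] hlt hg, if_pos (show (true = true) from rfl)]
        simp
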